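-- pv_equiv track=rewrite | github.com/fmoulita/PUB_BarrierRoute | Step01 - AddBarrierRoute.py | modify_route_code
-- ===== SOURCE A (Python) =====
-- def modify_route_code(route_code, service_point_codes):
--     """
--     Modify the route code based on the service point codes.
--     """
--
--     area_map = {service_point: code[:2] for service_point, code in service_point_codes.items()}
--     parts = route_code.split(":")
--     modified_parts = []
--
--     for i, part in enumerate(parts):
--         if part in service_point_codes:
--             if i > 0 and parts[i-1] not in service_point_codes:  # If it's not the first part and the previous part is not a service point
--                 modified_parts.append(f"InBarrier{service_point_codes[part]}")
--             modified_parts.append(f"{part}")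
--             if i < len(parts) - 1 and parts[i + 1] in service_point_codes:
--                 next_area = area_map.get(parts[i + 1])
--                 curr_area = area_map.get(part)
--                 if next_area != curr_area:
--                     modified_parts.append(f"OutBarrier{curr_area}")
--                     modified_parts.append(f"InBarrier{next_area}")
--             if i < len(parts) - 1 and parts[i+1] not in service_point_codes:
--                 modified_parts.append(f"OutBarrier{service_point_codes[part]}")
--         else:
--             modified_parts.append(part)
--
--     # Check if the last InBarrier tag has a corresponding OutBarrier tag
--     last_index = len(modified_parts) - 1
--     if modified_parts[last_index].startswith("InBarrier"):
--         last_area = modified_parts[last_index][10:]  # Extract area from "InBarrier" tag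
--         last_service_point = parts[-1]
--         if last_service_point in service_point_codes:
--             last_service_point_area = area_map.get(last_service_point)
--             if last_service_point_area != last_area:
--                 modified_parts.append(f"OutBarrier{last_area}")
--
--     modified_route_code = ":".join(modified_parts)
--     return modified_route_code
-- ===== SOURCE B (Python) =====
-- def modify_route_code(route_code, service_point_codes):
--     """
--     Staged re-implementation: (1) group the parts into maximal runs of
--     consecutive service points / non-service parts, (2) render each run as a
--     whole block (InBarrier prefix, area-change pairs inside, OutBarrier
--     suffix), (3) apply the final InBarrier balance check, (4) join.
--     """
--     parts = route_code.split(":")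
--     # stage 1: maximal runs of parts with equal service-point membership
--     runs = []
--     i = 0
--     while i < len(parts):
--         is_sp = parts[i] in service_point_codes
--         j = i + 1
--         while j < len(parts) and (parts[j] in service_point_codes) == is_sp:
--             j += 1
--         runs.append((is_sp, parts[i:j]))
--         i = j
--     # stage 2: render each run as a block
--     out = []
--     for j, (is_sp, run) in enumerate(runs):
--         if is_sp:
--             if j > 0:
--                 out.append("InBarrier" + service_point_codes[run[0]])
--             out.append(run[0])
--             for prev, cur in zip(run, run[1:]):
--                 pa = service_point_codes[prev][:2]
--                 ca = service_point_codes[cur][:2]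
--                 if ca != pa:
--                     out.append("OutBarrier" + pa)
--                     out.append("InBarrier" + ca)
--                 out.append(cur)
--             if j < len(runs) - 1:
--                 out.append("OutBarrier" + service_point_codes[run[-1]])
--         else:
--             out.extend(run)
--     # stage 3: final balance check on the last element
--     last = out[-1]
--     if last.startswith("InBarrier"):
--         area = last[10:]
--         lsp = parts[-1]
--         if lsp in service_point_codes and service_point_codes[lsp][:2] != area:
--             out.append("OutBarrier" + area)
--     return ":".join(out)
-- ===== Notes on version B (the rewrite author's own statement) =====
-- stated objective: alternative
-- what changed: Replaces A's single enumerate loop with per-index lookahead (parts[i-1]/parts[i+1] membership tests and a precomputed area dict) by a staged pipeline: first group the parts into maximal runs of consecutive service/non-service parts, then render each run as one block (InBarrier prefix if not the first run, area-change pairs between consecutive members, OutBarrier suffix if not the last run), then the final balance check and join.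
import Mathlib
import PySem

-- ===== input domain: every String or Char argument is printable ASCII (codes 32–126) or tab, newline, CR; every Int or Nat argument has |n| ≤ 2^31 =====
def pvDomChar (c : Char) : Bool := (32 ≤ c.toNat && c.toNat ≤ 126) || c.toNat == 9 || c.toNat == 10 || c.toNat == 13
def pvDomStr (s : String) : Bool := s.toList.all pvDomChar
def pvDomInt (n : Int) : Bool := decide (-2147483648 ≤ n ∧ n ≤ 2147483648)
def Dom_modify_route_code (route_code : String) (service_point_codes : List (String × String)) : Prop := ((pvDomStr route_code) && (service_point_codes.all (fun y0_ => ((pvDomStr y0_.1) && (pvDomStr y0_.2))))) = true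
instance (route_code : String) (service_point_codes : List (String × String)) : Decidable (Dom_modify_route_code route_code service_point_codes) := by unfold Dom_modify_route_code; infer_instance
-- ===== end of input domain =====

-- B replaces A's one enumerate loop with index lookahead by a staged pipeline
-- (group parts into maximal service/non-service runs, then render each run as
-- a block, then the final balance check); same cost, different decomposition.

-- The dict parameter is modeled per the type convention: association list in
-- insertion order, lookup = first match.  Shared dict-model primitives:
def pvGetQ (spc : List (String × String)) (k : String) : Option String :=
  (spc.find? (fun p => p.1 == k)).map (fun p => p.2)
def pvMem (spc : List (String × String)) (k : String) : Bool :=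
  (pvGetQ spc k).isSome
-- spc[k]; every use below is guarded by membership, so the default is never returned
def pvGetV (spc : List (String × String)) (k : String) : String :=
  (pvGetQ spc k).getD ""
-- code[:2] (nonnegative slice from 0 = take)
def pvTake2 (s : String) : String := String.ofList (s.toList.take 2)

-- ===== PORT A =====
-- {service_point: code[:2] for service_point, code in service_point_codes.items()}
def pvAreaMap (spc : List (String × String)) : List (String × String) :=
  spc.map (fun p => (p.1, pvTake2 p.2))

-- the body of A's `for i, part in enumerate(parts)` loop
def pvAStep (spc am : List (String × String)) (parts : List String) (i : Nat)
    (part : String) (acc : List String) : List String :=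
  if pvMem spc part then
    let acc := if 0 < i ∧ pvMem spc (parts.getD (i-1) "") = false
               then acc ++ ["InBarrier" ++ pvGetV spc part] else acc
    let acc := acc ++ [part]
    let acc := if i < parts.length - 1 ∧ pvMem spc (parts.getD (i+1) "") = true then
        let next_area := pvGetQ am (parts.getD (i+1) "")
        let curr_area := pvGetQ am part
        if next_area ≠ curr_area then
          -- both .get results are present under the membership guards (f-string of a str)
          acc ++ ["OutBarrier" ++ curr_area.getD "", "InBarrier" ++ next_area.getD ""]
        else acc
      else acc
    if i < parts.length - 1 ∧ pvMem spc (parts.getD (i+1) "") = false then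
      acc ++ ["OutBarrier" ++ pvGetV spc part]
    else acc
  else acc ++ [part]

def pvALoop (spc am : List (String × String)) (parts : List String) :
    List String → Nat → List String → List String
  | [], _, acc => acc
  | p :: rest, i, acc => pvALoop spc am parts rest (i+1) (pvAStep spc am parts i p acc)

def modify_route_code (route_code : String) (service_point_codes : List (String × String)) : String :=
  let am := pvAreaMap service_point_codes
  let parts := (PySem.Str.split? route_code ":").getD []   -- sep ":" ≠ "", never none
  let mp := pvALoop service_point_codes am parts parts 0 []
  let lastElem := PySem.List.pyGetD mp ((mp.length : Int) - 1) ""  -- modified_parts[last_index]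
  let mp := if PySem.Str.startswith lastElem "InBarrier" then
      let last_area := PySem.Str.slice lastElem (some 10) none     -- [10:]
      let lsp := PySem.List.pyGetD parts (-1) ""                   -- parts[-1]
      if pvMem service_point_codes lsp then
        -- Python compares Optional[str] != str
        if pvGetQ am lsp ≠ some last_area then mp ++ ["OutBarrier" ++ last_area] else mp
      else mp
    else mp
  PySem.Str.join ":" mp

-- ===== PORT B =====
-- service_point_codes[k][:2]
def pvArea (spc : List (String × String)) (k : String) : String :=
  pvTake2 (pvGetV spc k)

-- stage 1, inner while loop: scan forward while membership equals b
-- (transcribed as recursion on the scanned suffix; returns (run tail, rest))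
def pvTakeRun (spc : List (String × String)) (b : Bool) : List String → List String × List String
  | [] => ([], [])
  | p :: rest =>
    if pvMem spc p = b then
      let pr := pvTakeRun spc b rest
      (p :: pr.1, pr.2)
    else ([], p :: rest)

-- termination measure for the outer while loop
theorem pvTakeRun_len (spc : List (String × String)) (b : Bool) :
    ∀ l : List String, (pvTakeRun spc b l).2.length ≤ l.length := by
  intro l
  induction l with
  | nil => simp [pvTakeRun]
  | cons p rest ih =>
      simp only [pvTakeRun]
      split_ifs
      · exact le_trans ih (Nat.le_succ _)
      · simp

-- stage 1, outer while loop: maximal runs of equal membership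
def pvGroupRuns (spc : List (String × String)) : List String → List (Bool × List String)
  | [] => []
  | p :: rest =>
    let b := pvMem spc p
    let pr := pvTakeRun spc b rest
    (b, p :: pr.1) :: pvGroupRuns spc pr.2
termination_by l => l.length
decreasing_by exact Nat.lt_succ_of_le (pvTakeRun_len spc (pvMem spc p) rest)

-- stage 2, inner `for prev, cur in zip(run, run[1:])` loop
def pvPairs (spc : List (String × String)) : List String → List String
  | [] => []
  | [_] => []
  | p :: q :: t =>
      (if pvArea spc q ≠ pvArea spc p then
        ["OutBarrier" ++ pvArea spc p, "InBarrier" ++ pvArea spc q] else [])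
      ++ q :: pvPairs spc (q :: t)

-- stage 2, body of the `if is_sp` branch for one run
def pvRenderRun (spc : List (String × String)) (notFirst notLast : Bool)
    (run : List String) : List String :=
  (if notFirst then ["InBarrier" ++ pvGetV spc (run.headD "")] else [])
  ++ run.headD "" :: pvPairs spc run
  ++ (if notLast then ["OutBarrier" ++ pvGetV spc (run.getLastD "")] else [])

-- stage 2, `for j, (is_sp, run) in enumerate(runs)` loop
def pvRenderLoop (spc : List (String × String)) (n : Nat) :
    Nat → List (Bool × List String) → List String → List String
  | _, [], acc => acc
  | j, (b, run) :: rest, acc =>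
      pvRenderLoop spc n (j+1) rest
        (acc ++ (if b then pvRenderRun spc (decide (0 < j)) (decide (j < n - 1)) run else run))

def modify_route_code_alt (route_code : String) (service_point_codes : List (String × String)) : String :=
  let parts := (PySem.Str.split? route_code ":").getD []   -- sep ":" ≠ "", never none
  let runs := pvGroupRuns service_point_codes parts
  let out := pvRenderLoop service_point_codes runs.length 0 runs []
  let last := PySem.List.pyGetD out (-1) ""                -- out[-1]
  let out := if PySem.Str.startswith last "InBarrier" then
      let area := PySem.Str.slice last (some 10) none      -- [10:]
      let lsp := PySem.List.pyGetD parts (-1) ""           -- parts[-1]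
      if pvMem service_point_codes lsp ∧ pvArea service_point_codes lsp ≠ area
      then out ++ ["OutBarrier" ++ area] else out
    else out
  PySem.Str.join ":" out

-- ===== PRECONDITION & SPEC =====
def Spec_modify_route_code (route_code : String) (service_point_codes : List (String × String)) (out : String) : Prop := out = modify_route_code_alt route_code service_point_codes
instance (route_code : String) (service_point_codes : List (String × String)) (out : String) : Decidable (Spec_modify_route_code route_code service_point_codes out) := by unfold Spec_modify_route_code; infer_instance

-- ===== CLAIM (what is proved, stated in full; the proofs are below) =====
def Claim_equal_modify_route_code : Prop := ∀ (route_code : String) (service_point_codes : List (String × String)), Dom_modify_route_code route_code service_point_codes → Spec_modify_route_code route_code service_point_codes (modify_route_code route_code service_point_codes)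

-- ===== LEMMAS AND PROOFS =====

-- the area map looks up to the first-match value with [:2] applied
theorem pvGetQ_areaMap (spc : List (String × String)) (k : String) :
    pvGetQ (pvAreaMap spc) k = (pvGetQ spc k).map pvTake2 := by
  unfold pvGetQ pvAreaMap
  rw [List.find?_map]
  simp [Function.comp_def, Option.map_map]

theorem pvGetQ_areaMap_of_mem (spc : List (String × String)) (k : String)
    (h : pvMem spc k = true) : pvGetQ (pvAreaMap spc) k = some (pvArea spc k) := by
  unfold pvMem at h
  rcases ho : pvGetQ spc k with _ | v
  · rw [ho] at h; simp at h
  · rw [pvGetQ_areaMap, ho, pvArea, pvGetV, ho]; rfl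

-- out[-1] and out[len(out)-1] pick the same element
theorem pyGetD_len_sub_one {α : Type} (xs : List α) (d : α) :
    PySem.List.pyGetD xs ((xs.length : Int) - 1) d = PySem.List.pyGetD xs (-1) d := by
  rcases xs with _ | ⟨x, t⟩
  · rfl
  · have h1 : (((x :: t).length : Int)) - 1 = (((x :: t).length - 1 : Nat) : Int) := by
      simp
    rw [h1, PySem.List.pyGetD_natCast,
      PySem.List.pyGetD_neg_one (x :: t) d (by simp)]
    rw [List.getD_eq_getElem _ _ (by simp), List.getLast_eq_getElem]
    rfl

-- ---- A's lookahead loop as a prev-state machine (proof-side intermediate) ----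
def pvBLoop (spc : List (String × String)) :
    List String → Option String → Bool → List String → List String
  | [], _, _, acc => acc
  | part :: rest, prevSp, started, acc =>
    let isSp := pvMem spc part
    let acc := match prevSp with
      | some q =>
        if isSp then
          let prev_area := pvArea spc q
          let cur_area := pvArea spc part
          if cur_area ≠ prev_area then
            acc ++ ["OutBarrier" ++ prev_area, "InBarrier" ++ cur_area]
          else acc
        else acc ++ ["OutBarrier" ++ pvGetV spc q]
      | none => if started = true ∧ isSp = true
                then acc ++ ["InBarrier" ++ pvGetV spc part] else acc
    let acc := acc ++ [part]
    pvBLoop spc rest (if isSp then some part else none) true acc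

-- proof-side descriptions of the loop state after processing a prefix `pre`
def pvPrevOf (spc : List (String × String)) (pre : List String) : Option String :=
  match pre.getLast? with
  | none => none
  | some q => if pvMem spc q then some q else none

-- what A has already emitted after the last element of `pre` (by lookahead)
-- but the state machine has not yet (it emits it at the head of `rest`)
def pvPend (spc : List (String × String)) (prev? : Option String) (rest : List String) : List String :=
  match prev?, rest with
  | some q, p :: _ =>
      if pvMem spc p then
        (if pvArea spc p ≠ pvArea spc q then
          ["OutBarrier" ++ pvArea spc q, "InBarrier" ++ pvArea spc p] else [])
      else ["OutBarrier" ++ pvGetV spc q]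
  | _, _ => []

-- the state machine's emission at the head of an iteration
def pvBEmit (spc : List (String × String)) (prev? : Option String) (started : Bool) (p : String) : List String :=
  match prev? with
  | some q =>
      if pvMem spc p then
        (if pvArea spc p ≠ pvArea spc q then
          ["OutBarrier" ++ pvArea spc q, "InBarrier" ++ pvArea spc p] else [])
      else ["OutBarrier" ++ pvGetV spc q]
  | none => if started = true ∧ pvMem spc p = true then ["InBarrier" ++ pvGetV spc p] else []

theorem pvBLoop_cons (spc : List (String × String)) (p : String) (rest : List String)
    (prev? : Option String) (started : Bool) (acc : List String) :
    pvBLoop spc (p :: rest) prev? started acc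
      = pvBLoop spc rest (if pvMem spc p then some p else none) true
          ((acc ++ pvBEmit spc prev? started p) ++ [p]) := by
  rcases prev? with _ | q <;>
    simp only [pvBLoop, pvBEmit] <;> split_ifs <;> simp_all

theorem pvPrevOf_append (spc : List (String × String)) (pre : List String) (p : String) :
    pvPrevOf spc (pre ++ [p]) = if pvMem spc p then some p else none := by
  unfold pvPrevOf
  simp

theorem getE_two (pre l : List String) (x y z d : String) :
    (pre ++ x :: y :: z :: l)[pre.length + 1 + 1]?.getD d = z := by
  rw [List.getElem?_append_right (by omega)]
  simp [show pre.length + 1 + 1 - pre.length = 2 from by omega]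

-- one A-iteration = (pending from the previous element) ++ the machine's emission ++ the part ++ new pending
theorem pvAStep_eq (spc : List (String × String)) (pre : List String) (p : String)
    (rest' : List String) (acc : List String) :
    pvAStep spc (pvAreaMap spc) (pre ++ p :: rest') pre.length p
        (acc ++ pvPend spc (pvPrevOf spc pre) (p :: rest'))
      = ((acc ++ pvBEmit spc (pvPrevOf spc pre) (!pre.isEmpty) p) ++ [p])
          ++ pvPend spc (if pvMem spc p then some p else none) rest' := by
  rcases pre.eq_nil_or_concat with rfl | ⟨pre', q, rfl⟩
  · rcases rest' with _ | ⟨n, t⟩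
    · by_cases hp : pvMem spc p = true <;>
        simp [pvAStep, pvPend, pvBEmit, pvPrevOf, hp]
    · by_cases hp : pvMem spc p = true <;> by_cases hn' : pvMem spc n = true <;>
        simp [pvAStep, pvPend, pvBEmit, pvPrevOf, hp, hn',
          pvGetQ_areaMap_of_mem, List.append_assoc] ;
        (split_ifs <;> simp)
  · rcases rest' with _ | ⟨n, t⟩
    · by_cases hmq : pvMem spc q = true <;> by_cases hp : pvMem spc p = true <;>
        simp [pvAStep, pvPend, pvBEmit, pvPrevOf_append, hmq, hp,
          List.append_assoc]
    · by_cases hmq : pvMem spc q = true <;> by_cases hp : pvMem spc p = true <;>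
        by_cases hn' : pvMem spc n = true <;>
        simp [pvAStep, pvPend, pvBEmit, pvPrevOf_append, hmq, hp, hn', getE_two,
          pvGetQ_areaMap_of_mem, List.append_assoc] <;>
        split_ifs <;> simp_all

theorem pv_loop_eq (spc : List (String × String)) (parts : List String) :
    ∀ (rest pre acc : List String), parts = pre ++ rest →
    pvALoop spc (pvAreaMap spc) parts rest pre.length
        (acc ++ pvPend spc (pvPrevOf spc pre) rest)
      = pvBLoop spc rest (pvPrevOf spc pre) (!pre.isEmpty) acc := by
  intro rest
  induction rest with
  | nil =>
      intro pre acc _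
      cases pvPrevOf spc pre <;> simp [pvALoop, pvBLoop, pvPend]
  | cons p rest' ih =>
      intro pre acc hparts
      rw [pvBLoop_cons]
      have h2 : parts = (pre ++ [p]) ++ rest' := by simp [hparts]
      have := ih (pre ++ [p]) ((acc ++ pvBEmit spc (pvPrevOf spc pre) (!pre.isEmpty) p) ++ [p]) h2
      rw [pvPrevOf_append] at this
      have hlen : (pre ++ [p]).length = pre.length + 1 := by simp
      rw [hlen] at this
      have hemp : (!(pre ++ [p]).isEmpty) = true := by simp
      rw [hemp] at this
      rw [← this]
      simp only [pvALoop]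
      congr 1
      rw [hparts]
      exact pvAStep_eq spc pre p rest' acc

theorem pvPend_none (spc : List (String × String)) (rest : List String) :
    pvPend spc none rest = [] := by cases rest <;> rfl

-- ---- pvTakeRun specification ----
theorem pvTakeRun_spec (spc : List (String × String)) (b : Bool) :
    ∀ l : List String,
      (∀ p ∈ (pvTakeRun spc b l).1, pvMem spc p = b) ∧
      (pvTakeRun spc b l).1 ++ (pvTakeRun spc b l).2 = l ∧
      (∀ p, (pvTakeRun spc b l).2.head? = some p → pvMem spc p ≠ b) := by
  intro l
  induction l with
  | nil => simp [pvTakeRun]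
  | cons p rest ih =>
      by_cases hp : pvMem spc p = b
      · simp only [pvTakeRun, hp]
        refine ⟨?_, by simpa using ih.2.1, ih.2.2⟩
        intro q hq
        rcases List.mem_cons.mp hq with rfl | hq
        · exact hp
        · exact ih.1 q hq
      · simp only [pvTakeRun, if_neg hp]
        exact ⟨by simp, by simp, by intro q hq; simp at hq; subst hq; exact hp⟩

theorem pvGroupRuns_nil_iff (spc : List (String × String)) (l : List String) :
    pvGroupRuns spc l = [] ↔ l = [] := by
  cases l with
  | nil => simp [pvGroupRuns]
  | cons p rest => simp [pvGroupRuns]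

-- ---- state machine over whole runs ----
-- a non-service run (after the first element) is copied verbatim
theorem pvBLoop_nonsp (spc : List (String × String)) :
    ∀ (r tail acc : List String),
      (∀ p ∈ r, pvMem spc p = false) →
      pvBLoop spc (r ++ tail) none true acc = pvBLoop spc tail none true (acc ++ r) := by
  intro r
  induction r with
  | nil => intro tail acc _; simp
  | cons p t ih =>
      intro tail acc hall
      have hp : pvMem spc p = false := hall p (by simp)
      rw [List.cons_append, pvBLoop_cons,
        show (if pvMem spc p then some p else none) = (none : Option String) from by simp [hp],
        show pvBEmit spc none true p = [] from by simp [pvBEmit, hp]]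
      rw [ih tail _ (fun q hq => hall q (by simp [hq]))]
      simp

-- a service run (after the first element) emits the area-change pairs
theorem pvBLoop_sp (spc : List (String × String)) :
    ∀ (r : List String) (q : String) (tail acc : List String),
      (∀ p ∈ r, pvMem spc p = true) →
      pvBLoop spc (r ++ tail) (some q) true acc
        = pvBLoop spc tail (some ((q :: r).getLast (by simp))) true
            (acc ++ pvPairs spc (q :: r)) := by
  intro r
  induction r with
  | nil => intro q tail acc _; simp [pvPairs]
  | cons p t ih =>
      intro q tail acc hall
      have hp : pvMem spc p = true := hall p (by simp)
      rw [List.cons_append, pvBLoop_cons,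
        show (if pvMem spc p then some p else none) = some p from by simp [hp],
        show pvBEmit spc (some q) true p
          = (if pvArea spc p ≠ pvArea spc q then
              ["OutBarrier" ++ pvArea spc q, "InBarrier" ++ pvArea spc p] else [])
          from by simp [pvBEmit, hp]]
      rw [ih p tail _ (fun x hx => hall x (by simp [hx]))]
      have hlast : ((p :: t).getLast (by simp)) = ((q :: p :: t).getLast (by simp)) :=
        (List.getLast_cons (by simp)).symm
      rw [hlast]
      congr 1
      simp only [pvPairs]
      split_ifs <;> simp

-- OutBarrier pending between an sp run and the following run
def pvPendOut (spc : List (String × String)) (prev? : Option String) (parts : List String) : List String :=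
  match prev?, parts with
  | some q, _ :: _ => ["OutBarrier" ++ pvGetV spc q]
  | _, _ => []

-- the state machine equals the run renderer
theorem pv_render_eq (spc : List (String × String)) :
    ∀ (fuel : Nat) (parts : List String), parts.length ≤ fuel →
    ∀ (j n : Nat) (acc : List String) (prev? : Option String),
    n = j + (pvGroupRuns spc parts).length →
    (prev? = none ∨ ∃ q, prev? = some q ∧ pvMem spc q = true ∧
        (∀ p, parts.head? = some p → pvMem spc p = false)) →
    (j = 0 → prev? = none) →
    pvBLoop spc parts prev? (decide (0 < j)) acc
      = pvRenderLoop spc n j (pvGroupRuns spc parts) (acc ++ pvPendOut spc prev? parts) := by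
  intro fuel
  induction fuel with
  | zero =>
      intro parts hle j n acc prev? hn hprev hj0
      have hnil : parts = [] := by cases parts <;> simp_all
      subst hnil
      cases prev? <;> simp [pvBLoop, pvGroupRuns, pvRenderLoop, pvPendOut]
  | succ f ihf =>
  intro parts hle j n acc prev? hn hprev hj0
  cases parts with
  | nil =>
      cases prev? <;> simp [pvBLoop, pvGroupRuns, pvRenderLoop, pvPendOut]
  | cons p rest =>
      have hspec := pvTakeRun_spec spc (pvMem spc p) rest
      set pr := pvTakeRun spc (pvMem spc p) rest with hpr
      have hsplit : pr.1 ++ pr.2 = rest := hspec.2.1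
      have hlen2 : pr.2.length ≤ f := by
        have := pvTakeRun_len spc (pvMem spc p) rest
        rw [← hpr] at this
        simp only [List.length_cons] at hle
        omega
      have hG : pvGroupRuns spc (p :: rest) = (pvMem spc p, p :: pr.1) :: pvGroupRuns spc pr.2 := by
        rw [pvGroupRuns]
      have hn' : n = (j + 1) + (pvGroupRuns spc pr.2).length := by
        rw [hn, hG]; simp; omega
      rw [show rest = pr.1 ++ pr.2 from hsplit.symm] at hG
      by_cases hb : pvMem spc p = true
      · -- service run: prev? must be none
        have hpnone : prev? = none := by
          rcases hprev with h | ⟨q, rfl, _, hhead⟩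
          · exact h
          · exact absurd hb (by simpa using hhead p rfl)
        subst hpnone
        have hall1 : ∀ x ∈ pr.1, pvMem spc x = true := by
          intro x hx; rw [← hb]; exact hspec.1 x hx
        have hLmem : pvMem spc ((p :: pr.1).getLast (by simp)) = true := by
          have hmem := List.getLast_mem (l := p :: pr.1) (by simp)
          rcases List.mem_cons.mp hmem with h | h
          · rw [h]; exact hb
          · exact hall1 _ h
        have hih : ∀ acc' : List String,
            pvBLoop spc pr.2 (some ((p :: pr.1).getLast (by simp))) true acc'
              = pvRenderLoop spc n (j+1) (pvGroupRuns spc pr.2)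
                  (acc' ++ pvPendOut spc (some ((p :: pr.1).getLast (by simp))) pr.2) := by
          intro acc'
          have h := ihf pr.2 hlen2 (j+1) n acc' (some ((p :: pr.1).getLast (by simp)))
            hn'
            (Or.inr ⟨_, rfl, hLmem, fun x hx => by
                have := hspec.2.2 x hx
                simpa [hb] using this⟩)
            (by omega)
          rwa [show decide (0 < j + 1) = true from by simp] at h
        have hnotLast : decide (j < n - 1) = !pr.2.isEmpty := by
          rcases hp2 : pr.2 with _ | ⟨x, t⟩
          · rw [hp2] at hn'
            simp [pvGroupRuns] at hn'
            simp [hn']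
          · have hne : pvGroupRuns spc (x :: t) ≠ [] := by
              simp [pvGroupRuns_nil_iff]
            rcases h' : pvGroupRuns spc (x :: t) with _ | _
            · exact absurd h' hne
            · rw [hp2, h'] at hn'
              simp only [List.length_cons] at hn'
              simp only [List.isEmpty_cons, Bool.not_false, decide_eq_true_eq]
              omega
        rw [show rest = pr.1 ++ pr.2 from hsplit.symm, pvBLoop_cons,
          show (if pvMem spc p then some p else none) = some p from by simp [hb],
          show pvBEmit spc none (decide (0 < j)) p
            = (if decide (0 < j) then ["InBarrier" ++ pvGetV spc p] else [])
            from by simp [pvBEmit, hb]]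
        rw [pvBLoop_sp spc pr.1 p pr.2 _ hall1, hih _, hG]
        simp only [pvRenderLoop, hb]
        congr 1
        unfold pvRenderRun pvPendOut
        rw [hnotLast]
        have hgl : (p :: pr.1).getLast?.getD "" = (p :: pr.1).getLast (by simp) := by
          rw [List.getLast?_eq_some_getLast (by simp)]
          rfl
        rcases hp2 : pr.2 with _ | ⟨x, t⟩ <;>
          rcases hj : decide (0 < j) with _ | _ <;>
            simp [hgl, List.append_assoc]
      · -- non-service run
        have hb' : pvMem spc p = false := by simpa using hb
        have hall1 : ∀ x ∈ pr.1, pvMem spc x = false := by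
          intro x hx
          have := hspec.1 x hx
          rw [hb'] at this; exact this
        have hih : ∀ acc' : List String,
            pvBLoop spc pr.2 none true acc'
              = pvRenderLoop spc n (j+1) (pvGroupRuns spc pr.2)
                  (acc' ++ pvPendOut spc none pr.2) := by
          intro acc'
          have h := ihf pr.2 hlen2 (j+1) n acc' none hn' (Or.inl rfl) (by omega)
          rwa [show decide (0 < j + 1) = true from by simp] at h
        rw [show rest = pr.1 ++ pr.2 from hsplit.symm, pvBLoop_cons,
          show (if pvMem spc p then some p else none) = (none : Option String) from by simp [hb']]
        rw [pvBLoop_nonsp spc pr.1 pr.2 _ hall1, hih _, hG]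
        simp only [pvRenderLoop, hb', Bool.false_eq_true, if_false]
        congr 1
        rcases hprev2 : prev? with _ | q <;>
          rcases hj : decide (0 < j) with _ | _ <;>
            cases pr.2 <;>
              simp [pvBEmit, pvPendOut, hb', List.append_assoc]

-- ===== VERDICT (by name: the statement is the Claim_ definition above) =====
theorem modify_route_code_spec : Claim_equal_modify_route_code := by
  intro route_code spc _
  unfold Spec_modify_route_code modify_route_code modify_route_code_alt
  have hloopA := pv_loop_eq spc ((PySem.Str.split? route_code ":").getD [])
      ((PySem.Str.split? route_code ":").getD []) [] [] rfl
  have h0 : pvPrevOf spc [] = none := rfl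
  rw [h0, pvPend_none] at hloopA
  simp only [List.length_nil, List.append_nil, List.isEmpty_nil, Bool.not_true] at hloopA
  have hloopB := pv_render_eq spc ((PySem.Str.split? route_code ":").getD []).length
      ((PySem.Str.split? route_code ":").getD []) le_rfl 0
      (pvGroupRuns spc ((PySem.Str.split? route_code ":").getD [])).length [] none
      (Nat.zero_add _).symm (Or.inl rfl) (fun _ => rfl)
  rw [show pvPendOut spc none ((PySem.Str.split? route_code ":").getD []) = []
      from by cases ((PySem.Str.split? route_code ":").getD []) <;> rfl] at hloopB
  simp only [List.append_nil,
    show decide (0 < 0) = false from rfl] at hloopB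
  simp only [hloopA, hloopB]
  rw [pyGetD_len_sub_one]
  set lsp := PySem.List.pyGetD ((PySem.Str.split? route_code ":").getD []) (-1) "" with hlsp
  by_cases hmem : pvMem spc lsp = true
  · rw [pvGetQ_areaMap_of_mem spc lsp hmem]
    simp [hmem]
  · simp [hmem]
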